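-- pv_equiv track=rewrite | github.com/need-singularity/sylvian-singularity | verify/verify_info_hypotheses.py | has_monochromatic_triangle
-- ===== SOURCE A (Python) =====
-- from itertools import combinations
--
-- def has_monochromatic_triangle(n_verts, coloring):
--     """Check if edge 2-coloring of K_n contains monochromatic triangle."""
--     for v1, v2, v3 in combinations(range(n_verts), 3):
--         e1 = coloring.get((v1, v2), coloring.get((v2, v1)))
--         e2 = coloring.get((v1, v3), coloring.get((v3, v1)))
--         e3 = coloring.get((v2, v3), coloring.get((v3, v2)))
--         if e1 == e2 == e3:
--             return True
--     return False
-- ===== SOURCE B (Python) =====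
-- def has_monochromatic_triangle(n_verts, coloring):
--     """Check if edge 2-coloring of K_n contains monochromatic triangle."""
--     adj = {}  # color class (None = uncolored edge) -> {vertex: same-class neighbors seen so far}
--     for w in range(n_verts):
--         for v in range(w):
--             c = coloring.get((v, w), coloring.get((w, v)))
--             nb = adj.setdefault(c, {})
--             nv = nb.setdefault(v, set())
--             nw = nb.setdefault(w, set())
--             if nv & nw:
--                 return True
--             nv.add(w)
--             nw.add(v)
--     return False
-- ===== Notes on version B (the rewrite author's own statement) =====
-- stated objective: faster
-- what changed: Instead of A's scan over all C(n,3) vertex triples with three color lookups each, B adds vertices one at a time, maintaining for every color class (including the missing-edge class None) a same-class adjacency map, and returns True as soon as an inserted edge's two endpoints share a same-class neighbour.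
import Mathlib
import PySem

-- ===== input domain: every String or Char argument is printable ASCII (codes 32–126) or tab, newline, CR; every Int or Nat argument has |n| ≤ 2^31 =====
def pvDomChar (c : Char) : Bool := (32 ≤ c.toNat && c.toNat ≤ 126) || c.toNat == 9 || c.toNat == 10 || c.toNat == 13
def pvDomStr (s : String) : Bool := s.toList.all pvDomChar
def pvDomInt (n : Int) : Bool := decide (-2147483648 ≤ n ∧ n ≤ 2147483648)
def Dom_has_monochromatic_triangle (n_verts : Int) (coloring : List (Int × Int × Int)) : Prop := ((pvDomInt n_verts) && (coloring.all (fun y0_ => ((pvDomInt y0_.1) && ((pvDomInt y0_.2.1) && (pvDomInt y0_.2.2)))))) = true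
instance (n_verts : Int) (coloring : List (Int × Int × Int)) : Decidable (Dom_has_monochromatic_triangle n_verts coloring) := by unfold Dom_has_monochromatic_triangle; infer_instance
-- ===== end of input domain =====

-- B re-implements A's monochromatic-triangle test by inserting vertices one at a time into
-- per-color-class adjacency maps and returning at the first edge whose endpoints share a
-- same-class neighbour, instead of A's scan over all vertex triples (measured faster).


-- ===== PORT A =====
-- coloring.get((a, b), coloring.get((b, a)))
def pvColorOf (d : PySem.Dict (Int × Int) Int) (a b : Int) : Option Int :=
  match d.get? (a, b) with
  | some v => some v
  | none => d.get? (b, a)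

-- 'for v1, v2, v3 in combinations(range(n), 3): if …: return True' — itertools.combinations
-- is a LAZY generator consumed with an early return, so the loop is ported as a
-- short-circuiting recursion over the (same, lexicographic) triple order; exact.
def pvAnyPair (d : PySem.Dict (Int × Int) Int) (v1 : Int) : List Int → Bool
  | [] => false
  | v2 :: rest =>
      (rest.any (fun v3 =>
        let e1 := pvColorOf d v1 v2
        let e2 := pvColorOf d v1 v3
        let e3 := pvColorOf d v2 v3
        e1 == e2 && e2 == e3)) || pvAnyPair d v1 rest

def pvAnyTriple (d : PySem.Dict (Int × Int) Int) : List Int → Bool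
  | [] => false
  | v1 :: rest => pvAnyPair d v1 rest || pvAnyTriple d rest

def has_monochromatic_triangle (n_verts : Int) (coloring : List (Int × Int × Int)) : Bool :=
  -- the Python parameter is the dict {(t[0],t[1]): t[2] for t in coloring} (later keys overwrite)
  let d := PySem.Dict.ofList (coloring.map (fun t => ((t.1, t.2.1), t.2.2)))
  pvAnyTriple d (PySem.List.pyRange 0 n_verts 1)

-- ===== PORT B =====
-- one loop step of B's edge scan: none = the current edge closes a monochromatic
-- triangle ('return True'), some cl' = the updated per-class adjacency dict
def pvStepB (d : PySem.Dict (Int × Int) Int)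
    (cl : PySem.Dict (Option Int) (PySem.Dict Int (PySem.Set Int))) (u v : Int) :
    Option (PySem.Dict (Option Int) (PySem.Dict Int (PySem.Set Int))) :=
  let c := pvColorOf d u v
  let nb := cl.getD c PySem.Dict.empty
  let nu := nb.getD u PySem.Set.empty
  let nv := nb.getD v PySem.Set.empty
  if PySem.Set.inter nu nv == [] then
    some (cl.insert c ((nb.insert u (PySem.Set.add nu v)).insert v (PySem.Set.add nv u)))
  else
    none

-- 'for v in range(w): …' with the early 'return True' (none = returned True)
def pvRowB (d : PySem.Dict (Int × Int) Int) (w : Int) :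
    List Int → PySem.Dict (Option Int) (PySem.Dict Int (PySem.Set Int)) →
    Option (PySem.Dict (Option Int) (PySem.Dict Int (PySem.Set Int)))
  | [], cl => some cl
  | v :: vs, cl =>
    match pvStepB d cl v w with
    | none => none
    | some cl' => pvRowB d w vs cl'

-- 'for w in range(n_verts): …'
def pvColB (d : PySem.Dict (Int × Int) Int) :
    List Int → PySem.Dict (Option Int) (PySem.Dict Int (PySem.Set Int)) →
    Option (PySem.Dict (Option Int) (PySem.Dict Int (PySem.Set Int)))
  | [], cl => some cl
  | w :: ws, cl =>
    match pvRowB d w (PySem.List.pyRange 0 w 1) cl with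
    | none => none
    | some cl' => pvColB d ws cl'

def has_monochromatic_triangle_alt (n_verts : Int) (coloring : List (Int × Int × Int)) : Bool :=
  -- the Python parameter is the dict {(t[0],t[1]): t[2] for t in coloring} (later keys overwrite)
  let d := PySem.Dict.ofList (coloring.map (fun t => ((t.1, t.2.1), t.2.2)))
  (pvColB d (PySem.List.pyRange 0 n_verts 1) PySem.Dict.empty).isNone

-- ===== PRECONDITION & SPEC =====
def Spec_has_monochromatic_triangle (n_verts : Int) (coloring : List (Int × Int × Int)) (out : Bool) : Prop := out = has_monochromatic_triangle_alt n_verts coloring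
instance (n_verts : Int) (coloring : List (Int × Int × Int)) (out : Bool) : Decidable (Spec_has_monochromatic_triangle n_verts coloring out) := by unfold Spec_has_monochromatic_triangle; infer_instance

-- ===== CLAIM (what is proved, stated in full; the proofs are below) =====
def Claim_equal_has_monochromatic_triangle : Prop := ∀ (n_verts : Int) (coloring : List (Int × Int × Int)), Dom_has_monochromatic_triangle n_verts coloring → Spec_has_monochromatic_triangle n_verts coloring (has_monochromatic_triangle n_verts coloring)

-- ===== LEMMAS AND PROOFS =====

-- the common triangle predicate both programs decide
def pvTri (n : Int) (d : PySem.Dict (Int × Int) Int) : Prop :=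
  ∃ u v w : Int, 0 ≤ u ∧ u < v ∧ v < w ∧ w < n ∧
    pvColorOf d u v = pvColorOf d u w ∧ pvColorOf d u w = pvColorOf d v w

theorem pvAnyPair_pyRange_iff (d : PySem.Dict (Int × Int) Int) (v1 a b : Int) :
    pvAnyPair d v1 (PySem.List.pyRange a b 1) = true ↔
      ∃ v w : Int, a ≤ v ∧ v < w ∧ w < b ∧
        pvColorOf d v1 v = pvColorOf d v1 w ∧ pvColorOf d v1 w = pvColorOf d v w := by
  by_cases h : a < b
  · rw [PySem.List.pyRange_one_cons h]
    simp only [pvAnyPair, Bool.or_eq_true, List.any_eq_true, Bool.and_eq_true, beq_iff_eq]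
    rw [pvAnyPair_pyRange_iff d v1 (a+1) b]
    constructor
    · rintro (⟨z, hz, h1, h2⟩ | ⟨v, w, hv, hvw, hwb, h1, h2⟩)
      · rw [PySem.List.mem_pyRange_one] at hz
        exact ⟨a, z, le_refl a, by omega, by omega, h1, h2⟩
      · exact ⟨v, w, by omega, hvw, hwb, h1, h2⟩
    · rintro ⟨v, w, hv, hvw, hwb, h1, h2⟩
      by_cases hva : v = a
      · subst hva
        exact Or.inl ⟨w, by rw [PySem.List.mem_pyRange_one]; omega, h1, h2⟩
      · exact Or.inr ⟨v, w, by omega, hvw, hwb, h1, h2⟩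
  · have hnil : PySem.List.pyRange a b 1 = [] := by
      simp [PySem.List.pyRange]; omega
    rw [hnil]; simp [pvAnyPair]; omega
termination_by (b - a).toNat
decreasing_by omega

theorem pvAnyTriple_pyRange_iff (d : PySem.Dict (Int × Int) Int) (a b : Int) :
    pvAnyTriple d (PySem.List.pyRange a b 1) = true ↔
      ∃ u v w : Int, a ≤ u ∧ u < v ∧ v < w ∧ w < b ∧
        pvColorOf d u v = pvColorOf d u w ∧ pvColorOf d u w = pvColorOf d v w := by
  by_cases h : a < b
  · rw [PySem.List.pyRange_one_cons h]
    simp only [pvAnyTriple, Bool.or_eq_true]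
    rw [pvAnyPair_pyRange_iff d a (a+1) b, pvAnyTriple_pyRange_iff d (a+1) b]
    constructor
    · rintro (⟨v, w, hv, hvw, hwb, h1, h2⟩ | ⟨u, v, w, hu, huv, hvw, hwb, h1, h2⟩)
      · exact ⟨a, v, w, le_refl a, by omega, hvw, hwb, h1, h2⟩
      · exact ⟨u, v, w, by omega, huv, hvw, hwb, h1, h2⟩
    · rintro ⟨u, v, w, hu, huv, hvw, hwb, h1, h2⟩
      by_cases hua : u = a
      · subst hua
        exact Or.inl ⟨v, w, by omega, hvw, hwb, h1, h2⟩
      · exact Or.inr ⟨u, v, w, by omega, huv, hvw, hwb, h1, h2⟩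
  · have hnil : PySem.List.pyRange a b 1 = [] := by
      simp [PySem.List.pyRange]; omega
    rw [hnil]; simp [pvAnyTriple]; omega
termination_by (b - a).toNat
decreasing_by omega

theorem portA_iff (n : Int) (d : PySem.Dict (Int × Int) Int) :
    pvAnyTriple d (PySem.List.pyRange 0 n 1) = true ↔ pvTri n d := by
  rw [pvAnyTriple_pyRange_iff]; rfl

-- ---------- B side ----------

-- the edge list B's two nested loops traverse, flattened
def pvEdges (n : Int) : List (Int × Int) :=
  (PySem.List.pyRange 0 n 1).flatMap (fun w =>
    (PySem.List.pyRange 0 w 1).map (fun v => (v, w)))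

theorem mem_pvEdges (n u v : Int) :
    (u, v) ∈ pvEdges n ↔ 0 ≤ u ∧ u < v ∧ v < n := by
  simp only [pvEdges, List.mem_flatMap, List.mem_map, PySem.List.mem_pyRange_one]
  constructor
  · rintro ⟨x, hx, y, hy, heq⟩; cases heq; omega
  · intro h; exact ⟨v, by omega, u, by omega, rfl⟩

-- B's nested loops as one scan over the flattened edge list
def pvScan (d : PySem.Dict (Int × Int) Int) :
    List (Int × Int) → PySem.Dict (Option Int) (PySem.Dict Int (PySem.Set Int)) →
    Option (PySem.Dict (Option Int) (PySem.Dict Int (PySem.Set Int)))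
  | [], cl => some cl
  | e :: E, cl =>
    match pvStepB d cl e.1 e.2 with
    | none => none
    | some cl' => pvScan d E cl'

theorem pvScan_append (d : PySem.Dict (Int × Int) Int) (E1 E2 : List (Int × Int)) (cl) :
    pvScan d (E1 ++ E2) cl =
      match pvScan d E1 cl with
      | none => none
      | some cl' => pvScan d E2 cl' := by
  induction E1 generalizing cl with
  | nil => rfl
  | cons e E1 ih =>
    simp only [List.cons_append, pvScan]
    cases pvStepB d cl e.1 e.2 with
    | none => rfl
    | some cl' => exact ih cl'

theorem pvRowB_eq_scan (d : PySem.Dict (Int × Int) Int) (w : Int) (vs : List Int) (cl) :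
    pvRowB d w vs cl = pvScan d (vs.map (fun v => (v, w))) cl := by
  induction vs generalizing cl with
  | nil => rfl
  | cons v vs ih =>
    simp only [List.map_cons, pvRowB, pvScan]
    cases pvStepB d cl v w with
    | none => rfl
    | some cl' => exact ih cl'

theorem pvColB_eq_scan (d : PySem.Dict (Int × Int) Int) (ws : List Int) (cl) :
    pvColB d ws cl =
      pvScan d (ws.flatMap (fun w => (PySem.List.pyRange 0 w 1).map (fun v => (v, w)))) cl := by
  induction ws generalizing cl with
  | nil => rfl
  | cons w ws ih =>
    simp only [List.flatMap_cons, pvColB, pvScan_append, pvRowB_eq_scan]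
    cases pvScan d ((PySem.List.pyRange 0 w 1).map (fun v => (v, w))) cl with
    | none => rfl
    | some cl' => exact ih cl'

-- 'x and y are joined by an already-processed edge of class c' (edges are stored
-- as the ordered pairs the scan generated)
def pvAdj (d : PySem.Dict (Int × Int) Int) (P : List (Int × Int)) (c : Option Int)
    (x y : Int) : Prop :=
  ((x, y) ∈ P ∧ pvColorOf d x y = c) ∨ ((y, x) ∈ P ∧ pvColorOf d y x = c)

-- 'the edge e closes a monochromatic triangle with the already-processed edges P'
def pvHit (d : PySem.Dict (Int × Int) Int) (P : List (Int × Int)) (e : Int × Int) : Prop :=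
  ∃ x, pvAdj d P (pvColorOf d e.1 e.2) e.1 x ∧ pvAdj d P (pvColorOf d e.1 e.2) e.2 x

-- the scan invariant: cl is exactly the per-class adjacency of the processed edges P
def pvInv (d : PySem.Dict (Int × Int) Int)
    (cl : PySem.Dict (Option Int) (PySem.Dict Int (PySem.Set Int)))
    (P : List (Int × Int)) : Prop :=
  ∀ c x y, y ∈ (cl.getD c PySem.Dict.empty).getD x PySem.Set.empty ↔ pvAdj d P c x y

theorem pvStepB_none_iff (d : PySem.Dict (Int × Int) Int) (cl) (P : List (Int × Int))
    (hinv : pvInv d cl P) (u v : Int) :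
    pvStepB d cl u v = none ↔ pvHit d P (u, v) := by
  unfold pvStepB pvHit
  simp only
  split
  · rename_i hEmpty
    simp only [beq_iff_eq] at hEmpty
    constructor
    · intro h; exact absurd h (by simp)
    · rintro ⟨x, h1, h2⟩
      rw [← hinv] at h1 h2
      have : x ∈ PySem.Set.inter
          ((cl.getD (pvColorOf d u v) PySem.Dict.empty).getD u PySem.Set.empty)
          ((cl.getD (pvColorOf d u v) PySem.Dict.empty).getD v PySem.Set.empty) := by
        rw [PySem.Set.mem_inter]; exact ⟨h1, h2⟩
      rw [hEmpty] at this
      exact absurd this (by simp)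
  · rename_i hNE
    simp only [beq_iff_eq] at hNE
    have hne : PySem.Set.inter
        ((cl.getD (pvColorOf d u v) PySem.Dict.empty).getD u PySem.Set.empty)
        ((cl.getD (pvColorOf d u v) PySem.Dict.empty).getD v PySem.Set.empty) ≠ [] := hNE
    obtain ⟨x, hx⟩ := List.exists_mem_of_ne_nil _ hne
    rw [PySem.Set.mem_inter] at hx
    constructor
    · intro _
      exact ⟨x, (hinv _ _ _).1 hx.1, (hinv _ _ _).1 hx.2⟩
    · intro _; rfl

theorem pvAdj_append_single (d : PySem.Dict (Int × Int) Int) (P : List (Int × Int))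
    (u v : Int) (c : Option Int) (x y : Int) :
    pvAdj d (P ++ [(u, v)]) c x y ↔
      pvAdj d P c x y ∨
        (pvColorOf d u v = c ∧ ((x = u ∧ y = v) ∨ (x = v ∧ y = u))) := by
  unfold pvAdj
  simp only [List.mem_append, List.mem_singleton, Prod.mk.injEq]
  constructor
  · rintro (⟨hm | ⟨hx, hy⟩, hcol⟩ | ⟨hm | ⟨hy, hx⟩, hcol⟩)
    · exact Or.inl (Or.inl ⟨hm, hcol⟩)
    · subst hx; subst hy; exact Or.inr ⟨hcol, Or.inl ⟨rfl, rfl⟩⟩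
    · exact Or.inl (Or.inr ⟨hm, hcol⟩)
    · subst hx; subst hy; exact Or.inr ⟨hcol, Or.inr ⟨rfl, rfl⟩⟩
  · rintro ((⟨hm, hcol⟩ | ⟨hm, hcol⟩) | ⟨hcol, ⟨hx, hy⟩ | ⟨hx, hy⟩⟩)
    · exact Or.inl ⟨Or.inl hm, hcol⟩
    · exact Or.inr ⟨Or.inl hm, hcol⟩
    · subst hx; subst hy; exact Or.inl ⟨Or.inr ⟨rfl, rfl⟩, hcol⟩
    · subst hx; subst hy; exact Or.inr ⟨Or.inr ⟨rfl, rfl⟩, hcol⟩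

theorem pvStepB_some_inv (d : PySem.Dict (Int × Int) Int) (cl cl') (P : List (Int × Int))
    (hinv : pvInv d cl P) (u v : Int) (huv : u < v)
    (hstep : pvStepB d cl u v = some cl') : pvInv d cl' (P ++ [(u, v)]) := by
  unfold pvStepB at hstep
  simp only at hstep
  split at hstep
  · rw [Option.some_inj] at hstep
    subst hstep
    intro c' x y
    rw [pvAdj_append_single, PySem.Dict.getD_insert]
    by_cases hc' : c' = pvColorOf d u v
    · rw [if_pos hc', PySem.Dict.getD_insert, PySem.Dict.getD_insert]
      by_cases hxv : x = v
      · rw [if_pos hxv, PySem.Set.mem_add, hc', hxv, hinv (pvColorOf d u v) v y]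
        constructor
        · rintro (h | h)
          · exact Or.inl h
          · exact Or.inr ⟨rfl, Or.inr ⟨rfl, h⟩⟩
        · rintro (h | ⟨-, ⟨h1, h2⟩ | ⟨-, h2⟩⟩)
          · exact Or.inl h
          · exact absurd h1 (by omega)
          · exact Or.inr h2
      · rw [if_neg hxv]
        by_cases hxu : x = u
        · rw [if_pos hxu, PySem.Set.mem_add, hc', hxu, hinv (pvColorOf d u v) u y]
          constructor
          · rintro (h | h)
            · exact Or.inl h
            · exact Or.inr ⟨rfl, Or.inl ⟨rfl, h⟩⟩
          · rintro (h | ⟨-, ⟨-, h2⟩ | ⟨h1, h2⟩⟩)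
            · exact Or.inl h
            · exact Or.inr h2
            · exact absurd h1 (by omega)
        · rw [if_neg hxu, hc', hinv (pvColorOf d u v) x y]
          constructor
          · exact Or.inl
          · rintro (h | ⟨-, ⟨h1, -⟩ | ⟨h1, -⟩⟩)
            · exact h
            · exact absurd h1 hxu
            · exact absurd h1 hxv
    · rw [if_neg hc', hinv c' x y]
      constructor
      · exact Or.inl
      · rintro (h | ⟨h1, -⟩)
        · exact h
        · exact absurd h1 (fun hh => hc' hh.symm)
  · exact absurd hstep (by simp)

theorem pvScan_none_iff (d : PySem.Dict (Int × Int) Int) :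
    ∀ (E : List (Int × Int)) (cl) (P : List (Int × Int)),
      pvInv d cl P → (∀ e ∈ E, e.1 < e.2) →
      (pvScan d E cl = none ↔
        ∃ pre e post, E = pre ++ e :: post ∧ pvHit d (P ++ pre) e)
  | [], cl, P, _, _ => by
    simp only [pvScan]
    constructor
    · intro h; exact absurd h (by simp)
    · rintro ⟨pre, e, post, habs, -⟩
      exact absurd habs (by simp)
  | e :: E, cl, P, hinv, hord => by
    simp only [pvScan]
    cases hstep : pvStepB d cl e.1 e.2 with
    | none =>
      constructor
      · intro _
        refine ⟨[], e, E, rfl, ?_⟩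
        rw [List.append_nil]
        exact (pvStepB_none_iff d cl P hinv e.1 e.2).1 hstep
      · intro _; rfl
    | some cl' =>
      have hinv' : pvInv d cl' (P ++ [e]) :=
        pvStepB_some_inv d cl cl' P hinv e.1 e.2 (hord e (by simp)) hstep
      rw [pvScan_none_iff d E cl' (P ++ [e]) hinv' (fun e' he' => hord e' (by simp [he']))]
      constructor
      · rintro ⟨pre, e', post, hdec, hhit⟩
        refine ⟨e :: pre, e', post, by rw [hdec]; rfl, ?_⟩
        have hre : (P ++ [e]) ++ pre = P ++ e :: pre := by simp
        exact hre ▸ hhit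
      · rintro ⟨pre, e', post, hdec, hhit⟩
        cases pre with
        | nil =>
          simp only [List.nil_append] at hdec
          cases hdec
          rw [List.append_nil] at hhit
          have hnone := (pvStepB_none_iff d cl P hinv e.1 e.2).2 hhit
          rw [hstep] at hnone
          exact absurd hnone (by simp)
        | cons f pre' =>
          simp only [List.cons_append, List.cons.injEq] at hdec
          obtain ⟨hfe, hdec'⟩ := hdec
          subst hfe
          refine ⟨pre', e', post, hdec', ?_⟩
          have hre : (P ++ [e]) ++ pre' = P ++ e :: pre' := by simp
          rw [hre]
          exact hhit

theorem pairwise_lt_pyRange (a b : Int) :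
    (PySem.List.pyRange a b 1).Pairwise (· < ·) := by
  by_cases h : a < b
  · rw [PySem.List.pyRange_one_cons h]
    refine List.Pairwise.cons ?_ (pairwise_lt_pyRange (a+1) b)
    intro y hy
    rw [PySem.List.mem_pyRange_one] at hy
    omega
  · have hnil : PySem.List.pyRange a b 1 = [] := by
      simp [PySem.List.pyRange]; omega
    rw [hnil]; exact List.Pairwise.nil
termination_by (b - a).toNat
decreasing_by omega

-- the lexicographic order the edge scan follows
def pvLexLT (p q : Int × Int) : Prop := p.2 < q.2 ∨ (p.2 = q.2 ∧ p.1 < q.1)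

theorem pairwise_edges_from (n a : Int) :
    ((PySem.List.pyRange a n 1).flatMap
      (fun w => (PySem.List.pyRange 0 w 1).map (fun v => (v, w)))).Pairwise pvLexLT := by
  by_cases h : a < n
  · rw [PySem.List.pyRange_one_cons h]
    simp only [List.flatMap_cons]
    rw [List.pairwise_append]
    refine ⟨?_, pairwise_edges_from n (a + 1), ?_⟩
    · rw [List.pairwise_map]
      exact (pairwise_lt_pyRange 0 a).imp (fun hlt => Or.inr ⟨rfl, hlt⟩)
    · intro p hp q hq
      rw [List.mem_map] at hp
      obtain ⟨v, -, hpv⟩ := hp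
      rw [List.mem_flatMap] at hq
      obtain ⟨u', hu', hq⟩ := hq
      rw [List.mem_map] at hq
      obtain ⟨v', -, hqv⟩ := hq
      rw [PySem.List.mem_pyRange_one] at hu'
      subst hpv; subst hqv
      exact Or.inl (by omega)
  · have hnil : PySem.List.pyRange a n 1 = [] := by
      simp [PySem.List.pyRange]; omega
    rw [hnil]; exact List.Pairwise.nil
termination_by (n - a).toNat
decreasing_by omega

theorem pairwise_pvEdges (n : Int) : (pvEdges n).Pairwise pvLexLT :=
  pairwise_edges_from n 0

theorem portB_iff (n : Int) (d : PySem.Dict (Int × Int) Int) :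
    (pvColB d (PySem.List.pyRange 0 n 1) PySem.Dict.empty).isNone = true ↔ pvTri n d := by
  rw [Option.isNone_iff_eq_none, pvColB_eq_scan]
  have hinv0 : pvInv d PySem.Dict.empty [] := by
    intro c x y
    unfold pvAdj
    simp [PySem.Dict.getD_empty]
  have hord : ∀ e ∈ pvEdges n, e.1 < e.2 := by
    rintro ⟨a, b⟩ hab
    rw [mem_pvEdges] at hab
    exact hab.2.1
  rw [show (PySem.List.pyRange 0 n 1).flatMap
        (fun w => (PySem.List.pyRange 0 w 1).map (fun v => (v, w))) = pvEdges n from rfl]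
  rw [pvScan_none_iff d (pvEdges n) PySem.Dict.empty [] hinv0 hord]
  constructor
  · rintro ⟨pre, e, post, hdec, x, h1, h2⟩
    rw [List.nil_append] at h1 h2
    obtain ⟨u, v⟩ := e
    have hpreE : ∀ q ∈ pre, q ∈ pvEdges n := by
      intro q hq; rw [hdec]; exact List.mem_append_left _ hq
    have huvE : (u, v) ∈ pvEdges n := by
      rw [hdec]; exact List.mem_append_right _ (List.mem_cons_self)
    rw [mem_pvEdges] at huvE
    -- unpack the two adjacencies into ordered processed edges
    have hget : ∀ a b : Int, pvAdj d pre (pvColorOf d u v) a b →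
        ∃ p q : Int, p < q ∧ 0 ≤ p ∧ q < n ∧ ((p, q) = (a, b) ∨ (p, q) = (b, a)) ∧
          pvColorOf d p q = pvColorOf d u v := by
      rintro a b (⟨hm, hcol⟩ | ⟨hm, hcol⟩)
      · have := hpreE _ hm; rw [mem_pvEdges] at this
        exact ⟨a, b, this.2.1, this.1, this.2.2, Or.inl rfl, hcol⟩
      · have := hpreE _ hm; rw [mem_pvEdges] at this
        exact ⟨b, a, this.2.1, this.1, this.2.2, Or.inr rfl, hcol⟩
    obtain ⟨p1, q1, hpq1, hp1, hq1, hor1, hc1⟩ := hget u x h1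
    obtain ⟨p2, q2, hpq2, hp2, hq2, hor2, hc2⟩ := hget v x h2
    -- x is distinct from u and v; order the triple
    have hxu : x ≠ u := by rcases hor1 with h | h <;> (cases h; omega)
    have hxv : x ≠ v := by rcases hor2 with h | h <;> (cases h; omega)
    have hxn : x < n ∧ 0 ≤ x := by rcases hor1 with h | h <;> (cases h; omega)
    rcases lt_trichotomy x u with hx | hx | hx
    · -- triple (x, u, v)
      have e1 : pvColorOf d x u = pvColorOf d u v := by
        rcases hor1 with h | h
        · cases h; omega
        · cases h; exact hc1
      have e2 : pvColorOf d x v = pvColorOf d u v := by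
        rcases hor2 with h | h
        · cases h; omega
        · cases h; exact hc2
      exact ⟨x, u, v, by omega, hx, huvE.2.1, huvE.2.2, by rw [e1, e2], by rw [e2]⟩
    · exact absurd hx hxu
    · rcases lt_trichotomy x v with hx2 | hx2 | hx2
      · -- triple (u, x, v)
        have e1 : pvColorOf d u x = pvColorOf d u v := by
          rcases hor1 with h | h
          · cases h; exact hc1
          · cases h; omega
        have e2 : pvColorOf d x v = pvColorOf d u v := by
          rcases hor2 with h | h
          · cases h; omega
          · cases h; exact hc2
        exact ⟨u, x, v, huvE.1, hx, hx2, huvE.2.2, by rw [e1], by rw [e2]⟩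
      · exact absurd hx2 hxv
      · -- triple (u, v, x)
        have e1 : pvColorOf d u x = pvColorOf d u v := by
          rcases hor1 with h | h
          · cases h; exact hc1
          · cases h; omega
        have e2 : pvColorOf d v x = pvColorOf d u v := by
          rcases hor2 with h | h
          · cases h; exact hc2
          · cases h; omega
        exact ⟨u, v, x, huvE.1, huvE.2.1, hx2, hxn.1, by rw [e1], by rw [e1, e2]⟩
  · rintro ⟨u, v, w, h0, h1, h2, h3, he1, he2⟩
    -- split the edge list at (v, w); the two earlier edges (u,v), (u,w) lie in the prefix
    have hvwE : (v, w) ∈ pvEdges n := by rw [mem_pvEdges]; omega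
    obtain ⟨pre, post, hdec⟩ := List.append_of_mem hvwE
    have hpw : (pvEdges n).Pairwise pvLexLT := pairwise_pvEdges n
    rw [hdec] at hpw
    have hpost : ∀ q ∈ post, pvLexLT (v, w) q := by
      have := (List.pairwise_append.1 hpw).2.1
      intro q hq
      exact (List.pairwise_cons.1 this).1 q hq
    have hinpre : ∀ a b : Int, (a, b) ∈ pvEdges n → ¬ pvLexLT (v, w) (a, b) →
        (a, b) ≠ (v, w) → (a, b) ∈ pre := by
      intro a b hmem hnlex hne
      rw [hdec] at hmem
      rcases List.mem_append.1 hmem with h | h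
      · exact h
      · rcases List.mem_cons.1 h with h | h
        · exact absurd h hne
        · exact absurd (hpost _ h) hnlex
    have huv_pre : (u, v) ∈ pre := by
      apply hinpre
      · rw [mem_pvEdges]; omega
      · unfold pvLexLT; simp only; omega
      · intro hh; cases hh; omega
    have huw_pre : (u, w) ∈ pre := by
      apply hinpre
      · rw [mem_pvEdges]; omega
      · unfold pvLexLT; simp only; omega
      · intro hh; cases hh; omega
    refine ⟨pre, (v, w), post, hdec, u, ?_, ?_⟩
    · rw [List.nil_append]
      exact Or.inr ⟨huv_pre, by simp only; rw [he1, he2]⟩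
    · rw [List.nil_append]
      exact Or.inr ⟨huw_pre, by simp only; rw [he2]⟩

-- ===== VERDICT (by name: the statement is the Claim_ definition above) =====
theorem has_monochromatic_triangle_spec : Claim_equal_has_monochromatic_triangle := by
  intro n coloring _
  unfold Spec_has_monochromatic_triangle
  unfold has_monochromatic_triangle has_monochromatic_triangle_alt
  set d := PySem.Dict.ofList (coloring.map (fun t => ((t.1, t.2.1), t.2.2))) with hd
  have hA := portA_iff n d
  have hB := portB_iff n d
  simp only at hA hB ⊢
  rw [Bool.eq_iff_iff, hA, hB]
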